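-- pv_equiv track=rewrite | github.com/memedea1er/bbk2 | lab2.py | gambler_criterion
-- ===== SOURCE A (Python) =====
-- def gambler_criterion(gain_matrix, n_strategies, n_states):
--     """Критерий азартного игрока"""
--     max_gains = []
--     for i in range(n_strategies):
--         max_gain = gain_matrix[i][0]
--         for j in range(1, n_states):
--             if gain_matrix[i][j] > max_gain:
--                 max_gain = gain_matrix[i][j]
--         max_gains.append(max_gain)
--
--     # Находим оптимальную стратегию (максимальный максимальный выигрыш)
--     max_max_gain = max_gains[0]
--     optimal_strategy = 0
--     for i in range(1, n_strategies):
--         if max_gains[i] > max_max_gain: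
--             max_max_gain = max_gains[i]
--             optimal_strategy = i
--
--     return max_gains, optimal_strategy
-- ===== SOURCE B (Python) =====
-- def _seg_max(row, lo, hi):
--     """Maximum of row[lo:hi] by divide and conquer."""
--     if hi - lo <= 1:
--         return row[lo]
--     mid = (lo + hi) // 2
--     left = _seg_max(row, lo, mid)
--     right = _seg_max(row, mid, hi)
--     return right if right > left else left
--
--
-- def _seg_best(values, lo, hi):
--     """(maximum, first index of it) over values[lo:hi] by divide and conquer."""
--     if hi - lo <= 1:
--         return values[lo], lo
--     mid = (lo + hi) // 2
--     left = _seg_best(values, lo, mid)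
--     right = _seg_best(values, mid, hi)
--     return right if right[0] > left[0] else left
--
--
-- def gambler_criterion(gain_matrix, n_strategies, n_states):
--     """Критерий азартного игрока"""
--     max_gains = [_seg_max(gain_matrix[i], 0, n_states) for i in range(n_strategies)]
--     return max_gains, _seg_best(max_gains, 0, n_strategies)[1]
-- ===== Notes on version B (the rewrite author's own statement) =====
-- stated objective: alternative
-- what changed: Replaces A's linear scans with running accumulators (row max loop, then an argmax re-scan of the collected maxima) by divide-and-conquer recursions over index segments for both the row maximum and the (value, first index) argmax, combined with a strict-improvement merge.
import Mathlib
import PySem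

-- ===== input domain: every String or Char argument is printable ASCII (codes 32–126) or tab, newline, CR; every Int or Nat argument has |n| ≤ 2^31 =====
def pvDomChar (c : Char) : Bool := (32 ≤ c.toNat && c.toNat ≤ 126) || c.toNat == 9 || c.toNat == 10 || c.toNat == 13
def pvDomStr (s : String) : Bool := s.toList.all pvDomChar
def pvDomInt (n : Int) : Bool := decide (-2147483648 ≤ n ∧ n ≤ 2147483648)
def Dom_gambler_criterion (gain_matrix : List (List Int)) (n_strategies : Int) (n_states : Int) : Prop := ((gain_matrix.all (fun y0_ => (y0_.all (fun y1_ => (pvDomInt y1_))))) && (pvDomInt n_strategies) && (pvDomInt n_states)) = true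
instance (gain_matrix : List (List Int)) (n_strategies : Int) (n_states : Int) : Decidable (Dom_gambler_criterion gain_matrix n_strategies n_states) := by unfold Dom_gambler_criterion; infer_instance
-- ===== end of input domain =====

-- B computes the row maxima and the argmax by divide and conquer over index segments
-- instead of A's linear scans with running accumulators; same cost, same values everywhere.

-- ===== PORT A =====
-- inner loop: max_gain = row[0]; for j in range(1, n_states): if row[j] > max_gain: ...
def gcRowMax (row : List Int) (n_states : Int) : Int :=
  (PySem.List.pyRange 1 n_states 1).foldl
    (fun max_gain j =>
      if PySem.List.pyGetD row j 0 > max_gain then PySem.List.pyGetD row j 0 else max_gain)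
    (PySem.List.pyGetD row 0 0)

def gambler_criterion (gain_matrix : List (List Int)) (n_strategies : Int) (n_states : Int) : List Int × Int :=
  let max_gains := (PySem.List.pyRange 0 n_strategies 1).foldl
    (fun acc i => acc ++ [gcRowMax (PySem.List.pyGetD gain_matrix i []) n_states]) []
  let best := (PySem.List.pyRange 1 n_strategies 1).foldl
    (fun (p : Int × Int) i =>
      if PySem.List.pyGetD max_gains i 0 > p.1 then (PySem.List.pyGetD max_gains i 0, i) else p)
    (PySem.List.pyGetD max_gains 0 0, 0)
  (max_gains, best.2)

-- ===== PORT B =====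
-- _seg_max(row, lo, hi): maximum of row[lo:hi] by divide and conquer
-- (the Nat fuel only makes the halving recursion structural; it is never exhausted
-- when called with fuel ≥ hi - lo, as gcSegMax does)
def gcSegMaxGo (row : List Int) : Nat → Int → Int → Int
  | 0, lo, _hi => PySem.List.pyGetD row lo 0
  | fuel + 1, lo, hi =>
    if hi - lo ≤ 1 then PySem.List.pyGetD row lo 0
    else
      let mid := PySem.Int.floordiv (lo + hi) 2
      let left := gcSegMaxGo row fuel lo mid
      let right := gcSegMaxGo row fuel mid hi
      if right > left then right else left

def gcSegMax (row : List Int) (lo hi : Int) : Int :=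
  gcSegMaxGo row (hi - lo).toNat lo hi

-- _seg_best(values, lo, hi): (maximum, first index of it) over values[lo:hi] by divide and conquer
def gcSegBestGo (values : List Int) : Nat → Int → Int → Int × Int
  | 0, lo, _hi => (PySem.List.pyGetD values lo 0, lo)
  | fuel + 1, lo, hi =>
    if hi - lo ≤ 1 then (PySem.List.pyGetD values lo 0, lo)
    else
      let mid := PySem.Int.floordiv (lo + hi) 2
      let left := gcSegBestGo values fuel lo mid
      let right := gcSegBestGo values fuel mid hi
      if right.1 > left.1 then right else left

def gcSegBest (values : List Int) (lo hi : Int) : Int × Int :=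
  gcSegBestGo values (hi - lo).toNat lo hi

def gambler_criterion_alt (gain_matrix : List (List Int)) (n_strategies : Int) (n_states : Int) : List Int × Int :=
  let max_gains := (PySem.List.pyRange 0 n_strategies 1).map
    (fun i => gcSegMax (PySem.List.pyGetD gain_matrix i []) 0 n_states)
  (max_gains, (gcSegBest max_gains 0 n_strategies).2)

-- ===== PRECONDITION & SPEC =====
-- Pre_ is exactly the inputs on which A returns: otherwise A raises IndexError
-- (n_strategies outside (0, len(gain_matrix)], an empty scanned row, or a scanned row
-- shorter than a n_states ≥ 2); B raises on exactly the same inputs.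
def Pre_gambler_criterion (gain_matrix : List (List Int)) (n_strategies : Int) (n_states : Int) : Prop :=
  0 < n_strategies ∧ n_strategies ≤ (gain_matrix.length : Int) ∧
  ∀ row ∈ gain_matrix.take n_strategies.toNat,
    0 < row.length ∧ (n_states ≤ (row.length : Int) ∨ n_states ≤ 1)

instance (gain_matrix : List (List Int)) (n_strategies : Int) (n_states : Int) : Decidable (Pre_gambler_criterion gain_matrix n_strategies n_states) := by
  unfold Pre_gambler_criterion; infer_instance

def pvWitness_gambler_criterion : List (List Int) × Int × Int := ([[1, 2], [3, 0]], 2, 2)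

def Spec_gambler_criterion (gain_matrix : List (List Int)) (n_strategies : Int) (n_states : Int) (out : List Int × Int) : Prop := out = gambler_criterion_alt gain_matrix n_strategies n_states
instance (gain_matrix : List (List Int)) (n_strategies : Int) (n_states : Int) (out : List Int × Int) : Decidable (Spec_gambler_criterion gain_matrix n_strategies n_states out) := by unfold Spec_gambler_criterion; infer_instance

-- ===== CLAIM (what is proved, stated in full; the proofs are below) =====
def Claim_equal_gambler_criterion : Prop := ∀ (gain_matrix : List (List Int)) (n_strategies : Int) (n_states : Int), Dom_gambler_criterion gain_matrix n_strategies n_states → Pre_gambler_criterion gain_matrix n_strategies n_states → Spec_gambler_criterion gain_matrix n_strategies n_states (gambler_criterion gain_matrix n_strategies n_states)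

-- ===== LEMMAS AND PROOFS =====

-- the 'keep the right only on strict improvement' combiners of the two D&C helpers
def gcC1 (x y : Int) : Int := if y > x then y else x
def gcC2 (p q : Int × Int) : Int × Int := if q.1 > p.1 then q else p

theorem gcC1_assoc (a b d : Int) : gcC1 a (gcC1 b d) = gcC1 (gcC1 a b) d := by
  unfold gcC1; split_ifs <;> omega

theorem gcC2_assoc (a b d : Int × Int) : gcC2 a (gcC2 b d) = gcC2 (gcC2 a b) d := by
  unfold gcC2; split_ifs <;> first | rfl | omega

-- an associative combiner hoists out of a left fold
theorem gc_foldl_hoist {β : Type} (c : β → β → β)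
    (hc : ∀ a b d, c a (c b d) = c (c a b) d) :
    ∀ (l : List β) (a b : β), List.foldl c (c a b) l = c a (List.foldl c b l) := by
  intro l
  induction l with
  | nil => intro a b; rfl
  | cons x t ih =>
    intro a b
    simp only [List.foldl_cons]
    rw [← hc, ih]

-- the D&C segment maximum equals the left-to-right strict running max over the same indices
theorem gc_segmaxgo_eq (row : List Int) : ∀ (fuel : Nat) (lo hi : Int), (hi - lo).toNat ≤ fuel →
    gcSegMaxGo row fuel lo hi
      = List.foldl gcC1 (PySem.List.pyGetD row lo 0)
          ((PySem.List.pyRange (lo + 1) hi 1).map (fun j => PySem.List.pyGetD row j 0)) := by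
  intro fuel
  induction fuel with
  | zero =>
    intro lo hi h
    rw [gcSegMaxGo, PySem.List.pyRange_one_eq_nil (by omega)]
    rfl
  | succ fuel ih =>
    intro lo hi h
    rw [gcSegMaxGo]
    by_cases hle : hi - lo ≤ 1
    · rw [if_pos hle, PySem.List.pyRange_one_eq_nil (by omega)]
      rfl
    · rw [if_neg hle]
      have h1 : lo + 1 ≤ PySem.Int.floordiv (lo + hi) 2 :=
        (PySem.Int.le_floordiv_iff_mul_le (by omega)).mpr (by omega)
      have h2 : PySem.Int.floordiv (lo + hi) 2 < hi :=
        (PySem.Int.floordiv_lt_iff_lt_mul (by omega)).mpr (by omega)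
      set mid := PySem.Int.floordiv (lo + hi) 2 with hm
      rw [PySem.List.pyRange_one_append (lo + 1) mid hi (by omega) (by omega),
          List.map_append, List.foldl_append,
          PySem.List.pyRange_one_cons (a := mid) (b := hi) (by omega),
          List.map_cons, List.foldl_cons, ← ih lo mid (by omega)]
      show gcC1 (gcSegMaxGo row fuel lo mid) (gcSegMaxGo row fuel mid hi)
        = List.foldl gcC1 (gcC1 (gcSegMaxGo row fuel lo mid) (PySem.List.pyGetD row mid 0)) _
      rw [gc_foldl_hoist gcC1 gcC1_assoc, ← ih mid hi (by omega)]

theorem gc_segmax_eq (row : List Int) (lo hi : Int) :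
    gcSegMax row lo hi
      = List.foldl gcC1 (PySem.List.pyGetD row lo 0)
          ((PySem.List.pyRange (lo + 1) hi 1).map (fun j => PySem.List.pyGetD row j 0)) :=
  gc_segmaxgo_eq row _ lo hi le_rfl

-- the D&C segment argmax equals the left-to-right strict (value, index) update
theorem gc_segbestgo_eq (values : List Int) : ∀ (fuel : Nat) (lo hi : Int), (hi - lo).toNat ≤ fuel →
    gcSegBestGo values fuel lo hi
      = List.foldl gcC2 (PySem.List.pyGetD values lo 0, lo)
          ((PySem.List.pyRange (lo + 1) hi 1).map (fun j => (PySem.List.pyGetD values j 0, j))) := by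
  intro fuel
  induction fuel with
  | zero =>
    intro lo hi h
    rw [gcSegBestGo, PySem.List.pyRange_one_eq_nil (by omega)]
    rfl
  | succ fuel ih =>
    intro lo hi h
    rw [gcSegBestGo]
    by_cases hle : hi - lo ≤ 1
    · rw [if_pos hle, PySem.List.pyRange_one_eq_nil (by omega)]
      rfl
    · rw [if_neg hle]
      have h1 : lo + 1 ≤ PySem.Int.floordiv (lo + hi) 2 :=
        (PySem.Int.le_floordiv_iff_mul_le (by omega)).mpr (by omega)
      have h2 : PySem.Int.floordiv (lo + hi) 2 < hi :=
        (PySem.Int.floordiv_lt_iff_lt_mul (by omega)).mpr (by omega)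
      set mid := PySem.Int.floordiv (lo + hi) 2 with hm
      rw [PySem.List.pyRange_one_append (lo + 1) mid hi (by omega) (by omega),
          List.map_append, List.foldl_append,
          PySem.List.pyRange_one_cons (a := mid) (b := hi) (by omega),
          List.map_cons, List.foldl_cons, ← ih lo mid (by omega)]
      show gcC2 (gcSegBestGo values fuel lo mid) (gcSegBestGo values fuel mid hi)
        = List.foldl gcC2 (gcC2 (gcSegBestGo values fuel lo mid)
            (PySem.List.pyGetD values mid 0, mid)) _
      rw [gc_foldl_hoist gcC2 gcC2_assoc, ← ih mid hi (by omega)]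

theorem gc_segbest_eq (values : List Int) (lo hi : Int) :
    gcSegBest values lo hi
      = List.foldl gcC2 (PySem.List.pyGetD values lo 0, lo)
          ((PySem.List.pyRange (lo + 1) hi 1).map (fun j => (PySem.List.pyGetD values j 0, j))) :=
  gc_segbestgo_eq values _ lo hi le_rfl

-- A's inner loop is the segment maximum of indices [0, n_states)
theorem gc_rowmax_seg (row : List Int) (nst : Int) :
    gcRowMax row nst = gcSegMax row 0 nst := by
  rw [gc_segmax_eq, List.foldl_map, show (0 : Int) + 1 = 1 from rfl]
  rfl

theorem gambler_criterion_spec : Claim_equal_gambler_criterion := by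
  unfold Claim_equal_gambler_criterion Spec_gambler_criterion
  intro gm ns nst _ _
  unfold gambler_criterion gambler_criterion_alt
  dsimp only
  rw [PySem.List.foldl_append_singleton_eq_map
        (fun i => gcRowMax (PySem.List.pyGetD gm i []) nst) (PySem.List.pyRange 0 ns 1) [],
      List.nil_append]
  have hmap : (fun i => gcRowMax (PySem.List.pyGetD gm i []) nst)
      = (fun i => gcSegMax (PySem.List.pyGetD gm i []) 0 nst) := by
    funext i; exact gc_rowmax_seg _ _
  rw [hmap]
  set L := (PySem.List.pyRange 0 ns 1).map
      (fun i => gcSegMax (PySem.List.pyGetD gm i []) 0 nst) with hL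
  have hbest : (List.foldl
      (fun (p : Int × Int) i =>
        if PySem.List.pyGetD L i 0 > p.1 then (PySem.List.pyGetD L i 0, i) else p)
      (PySem.List.pyGetD L 0 0, 0) (PySem.List.pyRange 1 ns 1))
      = gcSegBest L 0 ns := by
    rw [gc_segbest_eq, List.foldl_map, show (0 : Int) + 1 = 1 from rfl]
    rfl
  rw [hbest]
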